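-- pv_equiv track=rewrite | github.com/dimasliu123/retail-dashboard | app.py | segR
-- ===== SOURCE A (Python) =====
-- def segR(R, R_Quant):
--     RSeg = []
--     r_25, r_50, r_75 = R_Quant
--     for r in R:
--         if r <= r_25:
--             RSeg.append(1)
--         elif r <= r_50:
--             RSeg.append(2)
--         elif r <= r_75:
--             RSeg.append(3)
--         else :
--             RSeg.append(4)
--     return RSeg
-- ===== SOURCE B (Python) =====
-- from itertools import takewhile
--
-- def segR(R, R_Quant):
--     # segment = 1 + length of the prefix of thresholds strictly below r
--     return [1 + sum(1 for _ in takewhile(lambda t: t < r, R_Quant)) for r in R]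
-- ===== Notes on version B (the rewrite author's own statement) =====
-- stated objective: idiomatic
-- what changed: Replaces the four-way if/elif comparison chain with a single comprehension that computes each segment as 1 plus the length of the takewhile-prefix of thresholds strictly below r.
import Mathlib
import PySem

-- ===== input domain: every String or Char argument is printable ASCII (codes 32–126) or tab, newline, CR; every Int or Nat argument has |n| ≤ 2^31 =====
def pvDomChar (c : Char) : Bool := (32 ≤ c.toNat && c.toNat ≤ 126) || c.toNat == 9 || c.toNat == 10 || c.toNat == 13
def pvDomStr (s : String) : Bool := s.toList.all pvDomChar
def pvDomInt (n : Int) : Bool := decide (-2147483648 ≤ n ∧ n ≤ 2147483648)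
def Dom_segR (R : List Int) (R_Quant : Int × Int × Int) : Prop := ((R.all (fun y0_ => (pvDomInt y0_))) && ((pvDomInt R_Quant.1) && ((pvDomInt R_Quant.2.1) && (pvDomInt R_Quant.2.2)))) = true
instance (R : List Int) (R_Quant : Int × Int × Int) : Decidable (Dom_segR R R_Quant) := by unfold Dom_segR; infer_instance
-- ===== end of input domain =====

-- B replaces A's four-way if/elif chain with a takewhile-prefix count over the threshold tuple (idiomatic; same behaviour on all inputs).

-- ===== PORT A =====
-- literal transliteration: fold over R appending 1/2/3/4 by the comparison cascade
def segR (R : List Int) (R_Quant : Int × Int × Int) : List Int :=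
  let r_25 := R_Quant.1
  let r_50 := R_Quant.2.1
  let r_75 := R_Quant.2.2
  R.foldl (fun RSeg r =>
    if r ≤ r_25 then RSeg ++ [1]
    else if r ≤ r_50 then RSeg ++ [2]
    else if r ≤ r_75 then RSeg ++ [3]
    else RSeg ++ [4]) []

-- ===== PORT B =====
-- literal transliteration of Source B: 1 + length of takewhile (t < r) over the threshold list
def segR_alt (R : List Int) (R_Quant : Int × Int × Int) : List Int :=
  R.map (fun r =>
    1 + (([R_Quant.1, R_Quant.2.1, R_Quant.2.2].takeWhile (fun t => decide (t < r))).length : Int))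

-- ===== PRECONDITION & SPEC =====
def Spec_segR (R : List Int) (R_Quant : Int × Int × Int) (out : List Int) : Prop := out = segR_alt R R_Quant
instance (R : List Int) (R_Quant : Int × Int × Int) (out : List Int) : Decidable (Spec_segR R R_Quant out) := by unfold Spec_segR; infer_instance

-- ===== CLAIM (what is proved, stated in full; the proofs are below) =====
def Claim_equal_segR : Prop := ∀ (R : List Int) (R_Quant : Int × Int × Int), Dom_segR R R_Quant → Spec_segR R R_Quant (segR R R_Quant)

-- ===== LEMMAS AND PROOFS =====

-- per-element agreement of the two formulas
theorem segR_elem (q1 q2 q3 r : Int) :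
    (if r ≤ q1 then (1 : Int) else if r ≤ q2 then 2 else if r ≤ q3 then 3 else 4)
      = 1 + (([q1, q2, q3].takeWhile (fun t => decide (t < r))).length : Int) := by
  simp only [List.takeWhile]
  by_cases h1 : q1 < r <;> by_cases h2 : q2 < r <;> by_cases h3 : q3 < r <;>
    simp [h1, h2, h3] <;> omega

-- the foldl-append accumulator of A is acc ++ map of the per-element value
theorem segR_foldl (q1 q2 q3 : Int) (R : List Int) (acc : List Int) :
    R.foldl (fun RSeg r =>
      if r ≤ q1 then RSeg ++ [1]
      else if r ≤ q2 then RSeg ++ [2]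
      else if r ≤ q3 then RSeg ++ [3]
      else RSeg ++ [4]) acc
      = acc ++ R.map (fun r =>
          if r ≤ q1 then (1 : Int) else if r ≤ q2 then 2 else if r ≤ q3 then 3 else 4) := by
  induction R generalizing acc with
  | nil => simp
  | cons r rs ih =>
    simp only [List.foldl, List.map]
    split_ifs <;> simp [ih, List.append_assoc]

-- ===== VERDICT (by name: the statement is the Claim_ definition above) =====
theorem segR_spec : Claim_equal_segR := by
  intro R q _
  unfold Spec_segR segR segR_alt
  rw [segR_foldl]
  simp only [List.nil_append]
  exact List.map_congr_left (fun r _ => segR_elem q.1 q.2.1 q.2.2 r)
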